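-- pv_equiv track=rewrite | github.com/mpintaric55334/BIONFORMATICS2_PROJECT | python/estimate.py | update_A
-- ===== SOURCE A (Python) =====
-- def check_state(symbol1: str, symbol2: str):
--     """
--     Function that checks the current state
--     and returns it.
--
--     Arguments:
--         - symbol1: str => first element of state
--         - symbol2: str => second element of state
--
--     Returns:
--         - [empty]: str => current state
--     """
--     if symbol1 != "-" and symbol2 != "-":
--         return "MM"
--     if symbol1 != "-" and symbol2 == "-":
--         return "Ix"
--     if symbol1 == "-" and symbol2 != "-":
--         return "Iy"
--
-- def update_A(A: dict, pair: tuple[str, str]):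
--     """
--     Function that updates A values for every
--     pair in estimation.
--
--     Arguments:
--         - A: dict => dictionary of transmission probabilites
--         - pair: tuple(str, str) => pair of sequences
--
--     Returns:
--         - A: dict => updated dictionary of probabilities
--     """
--     first, second = pair
--     N = len(first)
--     state = check_state(first[0], second[0])
--
--     for i in range(1, N):
--         new_state = check_state(first[i], second[i])
--         A[state][new_state] += 1
--         state = new_state
--     return A
-- ===== SOURCE B (Python) =====
-- def check_state(symbol1: str, symbol2: str):
--     if symbol1 != "-" and symbol2 != "-":
--         return "MM"
--     if symbol1 != "-" and symbol2 == "-":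
--         return "Ix"
--     if symbol1 == "-" and symbol2 != "-":
--         return "Iy"
--
--
-- def update_A(A: dict, pair: tuple[str, str]):
--     # Aggregate-then-apply: tally each distinct transition once in a counter,
--     # then do a single bulk += per distinct transition.
--     first, second = pair
--     states = [check_state(a, b) for a, b in zip(first, second)]
--     counts = {}
--     for t in zip(states, states[1:]):
--         counts[t] = counts.get(t, 0) + 1
--     for (s, t), c in counts.items():
--         A[s][t] += c
--     return A
-- ===== Notes on version B (the rewrite author's own statement) =====
-- stated objective: alternative
-- what changed: B aggregates: it tallies the transition pairs zip(states, states[1:]) into a counter dict and then performs one bulk A[s][t] += c per DISTINCT transition, instead of A's fused loop that threads the previous state through the iteration and does a separate += 1 at every position.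
import Mathlib
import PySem

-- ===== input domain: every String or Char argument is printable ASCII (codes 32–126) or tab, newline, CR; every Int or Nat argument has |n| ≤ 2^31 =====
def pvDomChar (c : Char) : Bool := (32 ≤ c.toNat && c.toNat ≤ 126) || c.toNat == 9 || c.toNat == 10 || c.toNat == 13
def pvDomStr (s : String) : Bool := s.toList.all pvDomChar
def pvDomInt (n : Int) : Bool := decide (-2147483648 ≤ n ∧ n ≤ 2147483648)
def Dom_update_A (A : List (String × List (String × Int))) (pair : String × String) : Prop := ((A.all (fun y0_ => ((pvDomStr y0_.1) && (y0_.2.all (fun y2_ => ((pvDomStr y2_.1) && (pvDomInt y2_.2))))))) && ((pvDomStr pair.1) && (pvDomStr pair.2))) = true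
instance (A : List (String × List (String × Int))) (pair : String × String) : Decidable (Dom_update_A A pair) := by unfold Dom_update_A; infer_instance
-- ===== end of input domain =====

-- B replaces A's fused incremental loop (previous state threaded through one pass, one
-- `+= 1` per position) by an aggregate-then-apply algorithm: tally the transition pairs
-- in a counter dict, then perform ONE bulk `+= c` per distinct transition.
-- Both A and B mutate the dict argument in place in Python; the equivalence proved here is
-- about the RETURN value (B performs the same mutation as A).

-- ===== PORT A =====
-- check_state works on one character of each sequence (Python passes the 1-char strings
-- first[i], second[i]; comparing such a string to "-" is exactly comparing its character to '-').
-- Returns none exactly where Python's check_state falls through and returns None.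
def check_state (symbol1 symbol2 : Char) : Option String :=
  if symbol1 ≠ '-' ∧ symbol2 ≠ '-' then some "MM"
  else if symbol1 ≠ '-' ∧ symbol2 = '-' then some "Ix"
  else if symbol1 = '-' ∧ symbol2 ≠ '-' then some "Iy"
  else none

-- A[s][t] += c — the dict-update statement both Pythons contain (A with c = 1, B with a
-- counter value c). Python raises KeyError when s/t is None or a missing key; Pre_ excludes
-- those inputs, so the getD defaults ("!", [], 0) are never reached on admitted inputs.
def bump_add (d : PySem.Dict String (List (String × Int))) (s t : Option String) (c : Int) :
    PySem.Dict String (List (String × Int)) :=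
  d.modify (s.getD "!") []
    (fun inner => ((PySem.Dict.mk inner).modify (t.getD "!") 0 (· + c)).items)

def update_A (A : List (String × List (String × Int))) (pair : String × String) :
    List (String × List (String × Int)) :=
  let first := pair.1.toList
  let second := pair.2.toList
  let N : Int := first.length
  -- first[0], second[0]: IndexError (= none) excluded by Pre_; the ' ' default is unreachable there
  let state := check_state ((PySem.List.pyGet? first 0).getD ' ')
                           ((PySem.List.pyGet? second 0).getD ' ')
  (((PySem.List.pyRange 1 N 1).foldl
      (fun (acc : PySem.Dict String (List (String × Int)) × Option String) i =>
        let new_state := check_state ((PySem.List.pyGet? first i).getD ' ')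
                                     ((PySem.List.pyGet? second i).getD ' ')
        (bump_add acc.1 acc.2 new_state 1, new_state))
      (PySem.Dict.mk A, state)).1).items

-- ===== PORT B =====
def update_A_alt (A : List (String × List (String × Int))) (pair : String × String) :
    List (String × List (String × Int)) :=
  let first := pair.1.toList
  let second := pair.2.toList
  -- states = [check_state(a, b) for a, b in zip(first, second)]
  let states := (first.zip second).map (fun p => check_state p.1 p.2)
  -- counts[t] = counts.get(t, 0) + 1 over zip(states, states[1:])
  let counts := (states.zip (states.drop 1)).foldl
      (fun (d : PySem.Dict (Option String × Option String) Int) t => d.insert t (d.getD t 0 + 1))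
      PySem.Dict.empty
  -- for (s, t), c in counts.items(): A[s][t] += c
  (counts.items.foldl (fun d pc => bump_add d pc.1.1 pc.1.2 pc.2) (PySem.Dict.mk A)).items

-- ===== PRECONDITION & SPEC =====
-- one step of Pre_: both states exist (no gap-gap position) and the transition's outer and
-- inner keys are present in the dict (Python's keys never change during the loop, so
-- membership in the ORIGINAL A is exact).
def pvOkStep (A : List (String × List (String × Int))) (s t : Option String) : Bool :=
  match s, t with
  | some s, some t =>
    match (PySem.Dict.mk A).get? s with
    | some inner => ((PySem.Dict.mk inner).get? t).isSome
    | none => false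
  | _, _ => false

-- Pre_ = exactly the inputs on which Python A returns: non-empty first, second at least as
-- long (else IndexError), and every consecutive transition has non-None states with both
-- dict keys present (else KeyError).  The Nodup conjuncts only rule out association lists
-- with duplicate keys, which no Python dict input can produce.
def Pre_update_A (A : List (String × List (String × Int))) (pair : String × String) : Prop :=
  pair.1.toList ≠ [] ∧ pair.1.toList.length ≤ pair.2.toList.length ∧
  (A.map (·.1)).Nodup ∧ (∀ p ∈ A, (p.2.map (·.1)).Nodup) ∧
  ∀ i : Nat, i < pair.1.toList.length → 1 ≤ i →
    pvOkStep A (check_state (pair.1.toList.getD (i - 1) ' ') (pair.2.toList.getD (i - 1) ' '))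
               (check_state (pair.1.toList.getD i ' ') (pair.2.toList.getD i ' ')) = true
instance (A : List (String × List (String × Int))) (pair : String × String) : Decidable (Pre_update_A A pair) := by unfold Pre_update_A; infer_instance

def pvWitness_update_A : (List (String × List (String × Int))) × (String × String) :=
  ([("MM", [("MM", 0), ("Iy", 0)]), ("Iy", [("Ix", 5)])], ("ab-c", "cdd-x"))

def Spec_update_A (A : List (String × List (String × Int))) (pair : String × String) (out : List (String × List (String × Int))) : Prop := out = update_A_alt A pair
instance (A : List (String × List (String × Int))) (pair : String × String) (out : List (String × List (String × Int))) : Decidable (Spec_update_A A pair out) := by unfold Spec_update_A; infer_instance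

-- ===== CLAIM (what is proved, stated in full; the proofs are below) =====
def Claim_equal_update_A : Prop := ∀ (A : List (String × List (String × Int))) (pair : String × String), Dom_update_A A pair → Pre_update_A A pair → Spec_update_A A pair (update_A A pair)

-- ===== LEMMAS AND PROOFS =====

-- the state at (Int) position i, as A's port computes it
def pvStAt (first second : List Char) (i : Int) : Option String :=
  check_state ((PySem.List.pyGet? first i).getD ' ') ((PySem.List.pyGet? second i).getD ' ')

-- B's per-position state list and transition list
def pvStates (first second : List Char) : List (Option String) :=
  (first.zip second).map (fun p => check_state p.1 p.2)

def pvT (first second : List Char) : List (Option String × Option String) :=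
  (pvStates first second).zip ((pvStates first second).drop 1)

-- the weighted transition-application loop (both final loops have this shape)
def pvFold (L : List ((Option String × Option String) × Int))
    (d : PySem.Dict String (List (String × Int))) : PySem.Dict String (List (String × Int)) :=
  L.foldl (fun d pc => bump_add d pc.1.1 pc.1.2 pc.2) d

def pvFold1 (T : List (Option String × Option String))
    (d : PySem.Dict String (List (String × Int))) : PySem.Dict String (List (String × Int)) :=
  T.foldl (fun d p => bump_add d p.1 p.2 1) d

-- total weight the list L adds at outer key k, inner key j
def pvW (L : List ((Option String × Option String) × Int)) (k j : String) : Int :=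
  ((L.filter (fun pc => pc.1.1.getD "!" == k && pc.1.2.getD "!" == j)).map (fun pc => pc.2)).sum

lemma pvStates_length (first second : List Char) (hlen : first.length ≤ second.length) :
    (pvStates first second).length = first.length := by
  simp [pvStates, Nat.min_eq_left hlen]

lemma pvStates_getElem (first second : List Char) (hlen : first.length ≤ second.length)
    (i : Nat) (hf : i < first.length) :
    (pvStates first second)[i]'(by rw [pvStates_length first second hlen]; exact hf)
      = check_state (first[i]'hf) (second[i]'(lt_of_lt_of_le hf hlen)) := by
  simp [pvStates, List.getElem_zip]

lemma pvStAt_eq (first second : List Char) (i : Nat) (hf : i < first.length)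
    (hs : i < second.length) :
    pvStAt first second (i : Int) = check_state (first[i]'hf) (second[i]'hs) := by
  simp [pvStAt, hf, hs]

lemma pvT_length (first second : List Char) (hlen : first.length ≤ second.length) :
    (pvT first second).length = first.length - 1 := by
  simp [pvT, pvStates_length first second hlen]

lemma pvT_getElem (first second : List Char) (hlen : first.length ≤ second.length) (k : Nat)
    (hk : k < (pvT first second).length) :
    (pvT first second)[k] = (pvStAt first second (k : Int), pvStAt first second ((k : Int) + 1)) := by
  have hT := pvT_length first second hlen
  have hS := pvStates_length first second hlen
  have hk1 : k < first.length := by omega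
  have hk2 : k + 1 < first.length := by omega
  have e1 : (pvT first second)[k].1 = pvStAt first second (k : Int) := by
    simp only [pvT, List.getElem_zip]
    rw [pvStates_getElem first second hlen k hk1, pvStAt_eq first second k hk1 (by omega)]
  have e2 : (pvT first second)[k].2 = pvStAt first second ((k : Int) + 1) := by
    simp only [pvT, List.getElem_zip]
    rw [List.getElem_drop]
    have h1k : 1 + k = k + 1 := by omega
    have : (pvStates first second)[1 + k]'(by rw [pvStates_length first second hlen]; omega)
        = (pvStates first second)[k + 1]'(by rw [pvStates_length first second hlen]; omega) := by
      congr 1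
    rw [this, pvStates_getElem first second hlen (k + 1) hk2]
    have hc : ((k : Int) + 1) = ((k + 1 : Nat) : Int) := by push_cast; ring
    rw [hc, pvStAt_eq first second (k + 1) hk2 (by omega)]
  calc (pvT first second)[k] = ((pvT first second)[k].1, (pvT first second)[k].2) := rfl
    _ = _ := by rw [e1, e2]

-- A's threaded fold over positions = plain fold of `+= 1` over the transition list
lemma pvLoop_eq (first second : List Char) (hlen : first.length ≤ second.length) :
    ∀ (n : Nat) (a : Int) (d : PySem.Dict String (List (String × Int))),
      ((first.length : Int) - a).toNat = n → 1 ≤ a →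
      ((PySem.List.pyRange a (first.length : Int) 1).foldl
          (fun (acc : PySem.Dict String (List (String × Int)) × Option String) i =>
            (bump_add acc.1 acc.2 (pvStAt first second i) 1, pvStAt first second i))
          (d, pvStAt first second (a - 1))).1
      = pvFold1 ((pvT first second).drop (a - 1).toNat) d := by
  intro n
  induction n with
  | zero =>
    intro a d hn ha
    rw [PySem.List.pyRange_one_eq_nil (by omega)]
    rw [List.drop_eq_nil_of_le (by rw [pvT_length first second hlen]; omega)]
    simp [pvFold1]
  | succ m ih =>
    intro a d hn ha
    have hab : a < (first.length : Int) := by omega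
    rw [PySem.List.pyRange_one_cons hab]
    simp only [List.foldl_cons]
    have hk : (a - 1).toNat < (pvT first second).length := by
      rw [pvT_length first second hlen]; omega
    rw [List.drop_eq_getElem_cons hk]
    rw [pvT_getElem first second hlen _ hk]
    have hc1 : ((a - 1).toNat : Int) = a - 1 := by omega
    rw [hc1]
    have hc2 : (a - 1 + 1 : Int) = a := by ring
    rw [hc2]
    simp only [pvFold1, List.foldl_cons]
    have := ih (a + 1) (bump_add d (pvStAt first second (a - 1)) (pvStAt first second a) 1)
      (by omega) (by omega)
    have hd : (a + 1) - 1 = a := by ring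
    rw [hd] at this
    have hd2 : (a - 1).toNat + 1 = (a + 1 - 1).toNat := by omega
    rw [hd2]
    simpa [pvFold1] using this

lemma pvW_nil (k j : String) : pvW [] k j = 0 := by simp [pvW]

lemma pvW_cons (pc : (Option String × Option String) × Int)
    (L : List ((Option String × Option String) × Int)) (k j : String) :
    pvW (pc :: L) k j
      = (if pc.1.1.getD "!" = k ∧ pc.1.2.getD "!" = j then pc.2 else 0) + pvW L k j := by
  simp only [pvW, List.filter_cons]
  by_cases h : pc.1.1.getD "!" = k ∧ pc.1.2.getD "!" = j
  · simp [h.1, h.2]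
  · have : (pc.1.1.getD "!" == k && pc.1.2.getD "!" == j) = false := by
      rcases not_and_or.mp h with h1 | h1 <;> simp [h1]
    simp [this, h]

-- core invariant of the weighted application loop: outer keys unchanged, inner keys
-- unchanged, each inner count grows by exactly the total weight pvW L k j
lemma pvFold_spec :
    ∀ (L : List ((Option String × Option String) × Int))
      (d : PySem.Dict String (List (String × Int))),
      (∀ pc ∈ L, d.contains (pc.1.1.getD "!") = true ∧
        (PySem.Dict.mk (d.getD (pc.1.1.getD "!") [])).contains (pc.1.2.getD "!") = true) →
      (pvFold L d).keys = d.keys ∧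
      ∀ k, (PySem.Dict.mk ((pvFold L d).getD k [])).keys
              = (PySem.Dict.mk (d.getD k [])).keys ∧
        ∀ j, (PySem.Dict.mk ((pvFold L d).getD k [])).getD j 0
              = (PySem.Dict.mk (d.getD k [])).getD j 0 + pvW L k j := by
  intro L
  induction L with
  | nil => intro d _; refine ⟨rfl, fun k => ⟨rfl, fun j => by simp [pvFold, pvW_nil]⟩⟩
  | cons pc L ih =>
    intro d h
    obtain ⟨hco, hci⟩ := h pc (by simp)
    have hfold : pvFold (pc :: L) d = pvFold L (bump_add d pc.1.1 pc.1.2 pc.2) := rfl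
    set s := pc.1.1.getD "!" with hs
    set t := pc.1.2.getD "!" with ht
    set d1 := bump_add d pc.1.1 pc.1.2 pc.2 with hd1
    -- keys of d1
    have hk1 : d1.keys = d.keys := by
      rw [hd1]; unfold bump_add
      rw [PySem.Dict.keys_modify, PySem.Dict.keys_insert_of_contains _ _ hco]
    -- getD of d1
    have hg1 : ∀ k, d1.getD k []
        = if k = s then ((PySem.Dict.mk (d.getD s [])).modify t 0 (· + pc.2)).items
          else d.getD k [] := by
      intro k; rw [hd1]; unfold bump_add; rw [PySem.Dict.getD_modify]
    -- inner dicts of d1: keys unchanged, counts bumped at (s, t)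
    have hik : ∀ k, (PySem.Dict.mk (d1.getD k [])).keys = (PySem.Dict.mk (d.getD k [])).keys := by
      intro k; rw [hg1 k]
      by_cases hks : k = s
      · rw [if_pos hks, hks]
        have : PySem.Dict.mk ((PySem.Dict.mk (d.getD s [])).modify t 0 (· + pc.2)).items
            = (PySem.Dict.mk (d.getD s [])).modify t 0 (· + pc.2) := rfl
        rw [this, PySem.Dict.keys_modify, PySem.Dict.keys_insert_of_contains _ _ hci]
      · rw [if_neg hks]
    have hig : ∀ k j, (PySem.Dict.mk (d1.getD k [])).getD j 0
        = (PySem.Dict.mk (d.getD k [])).getD j 0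
          + (if s = k ∧ t = j then pc.2 else 0) := by
      intro k j; rw [hg1 k]
      by_cases hks : k = s
      · rw [if_pos hks, hks]
        have : PySem.Dict.mk ((PySem.Dict.mk (d.getD s [])).modify t 0 (· + pc.2)).items
            = (PySem.Dict.mk (d.getD s [])).modify t 0 (· + pc.2) := rfl
        rw [this, PySem.Dict.getD_modify]
        by_cases hjt : j = t
        · rw [if_pos hjt, if_pos (⟨rfl, hjt.symm⟩ : s = s ∧ t = j), hjt]
        · rw [if_neg hjt, if_neg (fun h : s = s ∧ t = j => hjt h.2.symm)]
          exact (add_zero _).symm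
      · rw [if_neg hks]
        have : ¬ (s = k ∧ t = j) := fun h => hks h.1.symm
        simp [this]
    -- hypothesis transfer to d1
    have h' : ∀ pc' ∈ L, d1.contains (pc'.1.1.getD "!") = true ∧
        (PySem.Dict.mk (d1.getD (pc'.1.1.getD "!") [])).contains (pc'.1.2.getD "!") = true := by
      intro pc' hm
      obtain ⟨ho, hi⟩ := h pc' (by simp [hm])
      constructor
      · rw [PySem.Dict.contains_eq_decide_mem_keys, hk1,
          ← PySem.Dict.contains_eq_decide_mem_keys]; exact ho
      · rw [PySem.Dict.contains_eq_decide_mem_keys, hik,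
          ← PySem.Dict.contains_eq_decide_mem_keys]; exact hi
    obtain ⟨rk, rpt⟩ := ih d1 h'
    rw [hfold]
    refine ⟨by rw [rk, hk1], fun k => ⟨by rw [(rpt k).1, hik], fun j => ?_⟩⟩
    rw [(rpt k).2 j, hig k j, pvW_cons]
    have : (if pc.1.1.getD "!" = k ∧ pc.1.2.getD "!" = j then pc.2 else 0)
        = (if s = k ∧ t = j then pc.2 else 0) := by rw [hs, ht]
    rw [this]; ring

-- summing per-distinct-element counts over a covering Nodup list = counting directly
lemma pvCount_sum {α : Type} [BEq α] [LawfulBEq α] (P : α → Bool) :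
    ∀ (T D : List α), D.Nodup → (∀ u ∈ T, u ∈ D) →
      ((D.filter P).map (fun u => (T.count u : Int))).sum = (T.countP P : Int) := by
  intro T
  induction T with
  | nil =>
    intro D _ _
    simp
  | cons x T ih =>
    intro D hnd hcov
    have hx : x ∈ D := hcov x (by simp)
    have hcov' : ∀ u ∈ T, u ∈ D := fun u hu => hcov u (by simp [hu])
    have hsplit : ((D.filter P).map (fun u => ((x :: T).count u : Int))).sum
        = ((D.filter P).map (fun u => (T.count u : Int))).sum
          + ((D.filter P).map (fun u => if x == u then (1 : Int) else 0)).sum := by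
      rw [← PySem.List.sum_map_add_int]
      congr 1
      apply List.map_congr_left
      intro u _
      by_cases hxu : (x == u) = true
      · simp only [List.count_cons, hxu, if_true]
        push_cast
        ring
      · simp [List.count_cons, hxu]
    rw [hsplit, ih D hnd hcov']
    have hcnt : ((D.filter P).map (fun u => if x == u then (1 : Int) else 0)).sum
        = (((D.filter P).countP (fun u => x == u) : Nat) : Int) :=
      PySem.List.sum_map_ite_one_zero (fun u => x == u) (D.filter P)
    have hcp : (D.filter P).countP (fun u => x == u) = (D.filter P).count x := by
      unfold List.count
      apply List.countP_congr
      intro u _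
      simp only [beq_iff_eq]
      exact eq_comm
    have hind : ((D.filter P).map (fun u => if x == u then (1 : Int) else 0)).sum
        = if P x then 1 else 0 := by
      rw [hcnt, hcp]
      by_cases hPx : P x = true
      · rw [List.count_filter hPx]
        have h1 : 1 ≤ D.count x := List.one_le_count_iff.mpr hx
        have h2 : D.count x ≤ 1 := List.nodup_iff_count_le_one.mp hnd x
        have hone : D.count x = 1 := by omega
        rw [hone, if_pos hPx]
        norm_num
      · have hzero : (D.filter P).count x = 0 := by
          apply List.count_eq_zero.mpr
          intro hmem
          exact hPx (List.mem_filter.mp hmem).2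
        rw [hzero, if_neg hPx]
        norm_num
    rw [hind, List.countP_cons]
    by_cases hPx : P x = true
    · simp only [hPx, if_true]
      push_cast
      ring
    · simp [hPx]

-- weight of A's list (each transition once, weight 1) = raw transition count
lemma pvW_once (T : List (Option String × Option String)) (k j : String) :
    pvW (T.map (fun p => (p, (1 : Int)))) k j
      = ((T.countP (fun p => p.1.getD "!" == k && p.2.getD "!" == j) : Nat) : Int) := by
  unfold pvW
  rw [List.filter_map, List.map_map]
  have : ((fun pc : (Option String × Option String) × Int => pc.1.1.getD "!" == k && pc.1.2.getD "!" == j) ∘ (fun p => (p, (1 : Int))))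
      = (fun p : Option String × Option String => p.1.getD "!" == k && p.2.getD "!" == j) := rfl
  rw [this]
  have : ((fun pc : (Option String × Option String) × Int => pc.2) ∘ (fun p => (p, (1 : Int))))
      = (fun _ : Option String × Option String => (1 : Int)) := rfl
  rw [this, PySem.List.sum_map_const_int, List.countP_eq_length_filter]
  ring

-- weight of B's list (counter items) = the same raw transition count
lemma pvW_counter (T : List (Option String × Option String)) (k j : String) :
    pvW (PySem.Dict.counter T).items k j
      = ((T.countP (fun p => p.1.getD "!" == k && p.2.getD "!" == j) : Nat) : Int) := by
  unfold pvW
  rw [PySem.Dict.items_counter, List.filter_map, List.map_map]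
  have h1 : ((fun pc : (Option String × Option String) × Int => pc.1.1.getD "!" == k && pc.1.2.getD "!" == j) ∘ (fun u : Option String × Option String => (u, (List.count u T : Int))))
      = (fun p : Option String × Option String => p.1.getD "!" == k && p.2.getD "!" == j) := rfl
  have h2 : ((fun pc : (Option String × Option String) × Int => pc.2) ∘ (fun u : Option String × Option String => (u, (List.count u T : Int))))
      = (fun u : Option String × Option String => (List.count u T : Int)) := rfl
  rw [h1, h2]
  exact pvCount_sum _ T (PySem.Set.ofList T) (PySem.Set.nodup_ofList T)
    (fun u hu => (PySem.Set.mem_ofList T u).mpr hu)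

-- unpack one pvOkStep fact into the two contains facts pvFold_spec consumes
lemma pvOkStep_spec (A : List (String × List (String × Int))) (s t : Option String)
    (h : pvOkStep A s t = true) :
    (PySem.Dict.mk A).contains (s.getD "!") = true ∧
    (PySem.Dict.mk ((PySem.Dict.mk A).getD (s.getD "!") [])).contains (t.getD "!") = true := by
  match s, t with
  | some s, some t =>
    simp only [pvOkStep] at h
    cases hg : (PySem.Dict.mk A).get? s with
    | none => rw [hg] at h; simp at h
    | some inner =>
      rw [hg] at h
      constructor
      · simp only [Option.getD_some]
        rw [PySem.Dict.contains_eq_isSome_get?, hg]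
        rfl
      · simp only [Option.getD_some]
        rw [PySem.Dict.getD_of_get?_eq_some _ _ hg]
        rw [PySem.Dict.contains_eq_isSome_get?]
        exact h
  | none, _ => simp [pvOkStep] at h
  | some _, none => simp [pvOkStep] at h

-- every transition in pvT satisfies pvOkStep (from Pre_'s indexed form)
lemma pvT_ok (A : List (String × List (String × Int))) (first second : List Char)
    (hlen : first.length ≤ second.length)
    (hOk : ∀ i : Nat, i < first.length → 1 ≤ i →
      pvOkStep A (check_state (first.getD (i - 1) ' ') (second.getD (i - 1) ' '))
                 (check_state (first.getD i ' ') (second.getD i ' ')) = true) :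
    ∀ p ∈ pvT first second,
      (PySem.Dict.mk A).contains (p.1.getD "!") = true ∧
      (PySem.Dict.mk ((PySem.Dict.mk A).getD (p.1.getD "!") [])).contains (p.2.getD "!") = true := by
  intro p hp
  obtain ⟨k, hk, hget⟩ := List.getElem_of_mem hp
  have hT := pvT_length first second hlen
  have hk1 : k + 1 < first.length := by omega
  have hstep := hOk (k + 1) hk1 (by omega)
  rw [pvT_getElem first second hlen k hk] at hget
  have e1 : pvStAt first second (k : Int) = check_state (first.getD (k + 1 - 1) ' ') (second.getD (k + 1 - 1) ' ') := by
    rw [pvStAt_eq first second k (by omega) (by omega)]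
    rw [List.getD_eq_getElem _ _ (by omega), List.getD_eq_getElem _ _ (by omega)]
    rfl
  have e2 : pvStAt first second ((k : Int) + 1) = check_state (first.getD (k + 1) ' ') (second.getD (k + 1) ' ') := by
    have : ((k : Int) + 1) = ((k + 1 : Nat) : Int) := by push_cast; ring
    rw [this, pvStAt_eq first second (k + 1) (by omega) (by omega)]
    rw [List.getD_eq_getElem _ _ (by omega), List.getD_eq_getElem _ _ (by omega)]
  subst hget
  rw [← e1, ← e2] at hstep
  exact pvOkStep_spec A _ _ hstep

-- ===== VERDICT (by name: the statement is the Claim_ definition above) =====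
theorem update_A_spec : Claim_equal_update_A := by
  intro A pair _ hpre
  obtain ⟨hne, hlen, hndA, hndI, hOk⟩ := hpre
  unfold Spec_update_A update_A update_A_alt
  set first := pair.1.toList with hfirst
  set second := pair.2.toList with hsecond
  set T := pvT first second with hT
  set D0 := PySem.Dict.mk A with hD0
  -- A's side: threaded fold = pvFold over T.map (·, 1)
  have hA : (((PySem.List.pyRange 1 (first.length : Int) 1).foldl
      (fun (acc : PySem.Dict String (List (String × Int)) × Option String) i =>
        let new_state := check_state ((PySem.List.pyGet? first i).getD ' ')
                                     ((PySem.List.pyGet? second i).getD ' ')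
        (bump_add acc.1 acc.2 new_state 1, new_state))
      (D0, check_state ((PySem.List.pyGet? first 0).getD ' ')
                       ((PySem.List.pyGet? second 0).getD ' '))).1)
      = pvFold (T.map (fun p => (p, (1 : Int)))) D0 := by
    have h := pvLoop_eq first second hlen ((first.length : Int) - 1).toNat 1 D0 rfl (by omega)
    have h0 : pvStAt first second (1 - 1 : Int) = check_state ((PySem.List.pyGet? first 0).getD ' ')
        ((PySem.List.pyGet? second 0).getD ' ') := by norm_num [pvStAt]
    rw [h0] at h
    have hdrop : (pvT first second).drop ((1 : Int) - 1).toNat = T := by norm_num [hT]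
    rw [hdrop] at h
    have hfold1 : pvFold1 T D0 = pvFold (T.map (fun p => (p, (1 : Int)))) D0 := by
      unfold pvFold pvFold1
      rw [List.foldl_map]
    rw [← hfold1]
    rw [← h]
    rfl
  dsimp only
  rw [hA]
  -- B's side: the hand-built counts dict is counter T, and the apply loop is pvFold
  have hB : ((((first.zip second).map (fun p => check_state p.1 p.2)).zip
        ((((first.zip second).map (fun p => check_state p.1 p.2))).drop 1)).foldl
      (fun (d : PySem.Dict (Option String × Option String) Int) t => d.insert t (d.getD t 0 + 1))
      PySem.Dict.empty) = PySem.Dict.counter T := by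
    rw [← PySem.Dict.foldl_insert_getD_add_one_eq_counter]
    rfl
  rw [hB]
  -- both sides are pvFold applications; compare them pointwise
  have hTok := pvT_ok A first second hlen hOk
  have hhypA : ∀ pc ∈ T.map (fun p => (p, (1 : Int))), D0.contains (pc.1.1.getD "!") = true ∧
      (PySem.Dict.mk (D0.getD (pc.1.1.getD "!") [])).contains (pc.1.2.getD "!") = true := by
    intro pc hpc
    obtain ⟨p, hp, rfl⟩ := List.mem_map.mp hpc
    exact hTok p hp
  have hhypB : ∀ pc ∈ (PySem.Dict.counter T).items, D0.contains (pc.1.1.getD "!") = true ∧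
      (PySem.Dict.mk (D0.getD (pc.1.1.getD "!") [])).contains (pc.1.2.getD "!") = true := by
    intro pc hpc
    rw [PySem.Dict.items_counter] at hpc
    obtain ⟨u, hu, rfl⟩ := List.mem_map.mp hpc
    exact hTok u ((PySem.Set.mem_ofList T u).mp hu)
  obtain ⟨hkA, hptA⟩ := pvFold_spec (T.map (fun p => (p, (1 : Int)))) D0 hhypA
  obtain ⟨hkB, hptB⟩ := pvFold_spec (PySem.Dict.counter T).items D0 hhypB
  -- show the two result dicts have equal items lists
  have hD0keys : D0.keys = A.map (·.1) := by rw [hD0]; rfl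
  have hndK : D0.keys.Nodup := by rw [hD0keys]; exact hndA
  have hfoldB : (PySem.Dict.counter T).items.foldl
      (fun d pc => bump_add d pc.1.1 pc.1.2 pc.2) D0 = pvFold (PySem.Dict.counter T).items D0 := rfl
  rw [hfoldB]
  rw [PySem.Dict.items_eq_map_keys _ (by rw [hkA]; exact hndK) [],
      PySem.Dict.items_eq_map_keys _ (by rw [hkB]; exact hndK) []]
  rw [hkA, hkB]
  apply List.map_congr_left
  intro k hkmem
  -- k is a real key of A: get its inner list v
  rw [hD0keys] at hkmem
  obtain ⟨q, hq, hq1⟩ := List.mem_map.mp hkmem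
  have hv : D0.getD k [] = q.2 := by
    apply PySem.Dict.getD_of_mem_items
    · show (k, q.2) ∈ A
      rw [← hq1]; exact hq
    · exact hndK
  have hndv : (PySem.Dict.mk (D0.getD k [])).keys.Nodup := by
    rw [hv]
    show (q.2.map (·.1)).Nodup
    exact hndI q hq
  -- inner dicts agree pointwise, hence as items lists
  obtain ⟨hikA, higA⟩ := hptA k
  obtain ⟨hikB, higB⟩ := hptB k
  have hinner : (pvFold (T.map (fun p => (p, (1 : Int)))) D0).getD k []
      = (pvFold (PySem.Dict.counter T).items D0).getD k [] := by
    have eA : (pvFold (T.map (fun p => (p, (1 : Int)))) D0).getD k []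
        = (PySem.Dict.mk ((pvFold (T.map (fun p => (p, (1 : Int)))) D0).getD k [])).items := rfl
    have eB : (pvFold (PySem.Dict.counter T).items D0).getD k []
        = (PySem.Dict.mk ((pvFold (PySem.Dict.counter T).items D0).getD k [])).items := rfl
    rw [eA, eB]
    rw [PySem.Dict.items_eq_map_keys _ (by rw [hikA]; exact hndv) 0,
        PySem.Dict.items_eq_map_keys _ (by rw [hikB]; exact hndv) 0]
    rw [hikA, hikB]
    apply List.map_congr_left
    intro j _
    rw [higA j, higB j, pvW_once, pvW_counter]
  rw [hinner]
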